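-- pv_equiv track=rewrite | github.com/igcarras/EDA | exam2022/FINAL ENTREGAS/dcproblem 29.py | _buscar_ultimo
-- ===== SOURCE A (Python) =====
-- def _buscar_ultimo(a,x,start,end):
--     if start == end:
--         if a[start] == x:
--             return start
--         else:
--             return -1
--     if start <= end:
--         mid= (start + end) // 2
--         i1 =  _buscar_ultimo(a, x, start,mid)
--         i2 = _buscar_ultimo(a, x, mid+ 1, end)
--
--         return max(i1, i2)
--
--     return -1
-- ===== SOURCE B (Python) =====
-- def _buscar_ultimo(a, x, start, end):
--     # Flat backward scan: the last index in [start, end] holding x is the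
--     # first match found scanning from end down to start; -1 if none.
--     for i in range(end, start - 1, -1):
--         if a[i] == x:
--             return i
--     return -1
-- ===== Notes on version B (the rewrite author's own statement) =====
-- stated objective: simpler
-- what changed: Replaces the divide-and-conquer recursion (split at mid, recurse on both halves, merge with max) by a single flat backward scan from end to start that returns the first matching index, else -1.
-- outside the precondition, e.g. on _buscar_ultimo([7, 5], 7, -2, -1): A returns -1, B returns -2
import Mathlib
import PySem

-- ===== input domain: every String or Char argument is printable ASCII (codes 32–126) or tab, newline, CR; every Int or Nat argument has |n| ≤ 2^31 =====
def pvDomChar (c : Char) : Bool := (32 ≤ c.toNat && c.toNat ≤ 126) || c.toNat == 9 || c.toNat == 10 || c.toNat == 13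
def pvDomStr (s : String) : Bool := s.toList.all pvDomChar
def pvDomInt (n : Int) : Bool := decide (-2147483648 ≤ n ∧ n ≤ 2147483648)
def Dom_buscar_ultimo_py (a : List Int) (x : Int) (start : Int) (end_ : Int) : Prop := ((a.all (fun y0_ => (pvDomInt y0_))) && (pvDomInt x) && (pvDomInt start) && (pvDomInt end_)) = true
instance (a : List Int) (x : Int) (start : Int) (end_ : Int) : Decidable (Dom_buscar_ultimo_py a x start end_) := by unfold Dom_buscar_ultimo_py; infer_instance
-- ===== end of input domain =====

-- B replaces A's divide-and-conquer max-merge recursion by a single flat backward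
-- scan that returns the first (= last) matching index; same O(n) cost, simpler.

-- ===== PORT A =====
-- literal port of the recursive split; a[start] is PySem.List.pyGet? (none = IndexError,
-- excluded by Pre_), '//' is PySem.Int.floordiv
def buscar_ultimo_py (a : List Int) (x : Int) (start : Int) (end_ : Int) : Int :=
  if start = end_ then
    (if PySem.List.pyGet? a start = some x then start else -1)
  else if start ≤ end_ then
    let mid := PySem.Int.floordiv (start + end_) 2
    max (buscar_ultimo_py a x start mid) (buscar_ultimo_py a x (mid + 1) end_)
  else -1
termination_by (end_ - start).toNat
decreasing_by
  · have h2 : PySem.Int.floordiv (start + end_) 2 = (start + end_) / 2 := by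
      simp [PySem.Int.floordiv, Int.fdiv_eq_ediv]
    omega
  · have h2 : PySem.Int.floordiv (start + end_) 2 = (start + end_) / 2 := by
      simp [PySem.Int.floordiv, Int.fdiv_eq_ediv]
    omega

-- ===== PORT B =====
-- for i in range(end, start-1, -1): if a[i] == x: return i  /  return -1
-- (the early-returning for loop is List.find? over the countdown range)
def buscar_ultimo_py_alt (a : List Int) (x : Int) (start : Int) (end_ : Int) : Int :=
  match (PySem.List.pyRange end_ (start - 1) (-1)).find?
      (fun i => PySem.List.pyGet? a i == some x) with
  | some i => i
  | none => -1

-- ===== PRECONDITION & SPEC =====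
-- Pre_ excludes calls with start ≤ end_ whose indices are not all in [0, len(a)):
-- out-of-range indices make A raise IndexError, and negative indices (Python
-- wraparound, outside the natural 0-based domain of this range search) make A
-- conflate a found negative index with its -1 not-found sentinel via max.
def Pre_buscar_ultimo_py (a : List Int) (x : Int) (start : Int) (end_ : Int) : Prop :=
  end_ < start ∨ (0 ≤ start ∧ end_ < a.length)
instance (a : List Int) (x : Int) (start : Int) (end_ : Int) : Decidable (Pre_buscar_ultimo_py a x start end_) := by unfold Pre_buscar_ultimo_py; infer_instance

def pvWitness_buscar_ultimo_py : List Int × Int × Int × Int := ([1, 2, 1, 3], 1, 0, 3)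

def Spec_buscar_ultimo_py (a : List Int) (x : Int) (start : Int) (end_ : Int) (out : Int) : Prop := out = buscar_ultimo_py_alt a x start end_
instance (a : List Int) (x : Int) (start : Int) (end_ : Int) (out : Int) : Decidable (Spec_buscar_ultimo_py a x start end_ out) := by unfold Spec_buscar_ultimo_py; infer_instance

-- ===== CLAIM (what is proved, stated in full; the proofs are below) =====
def Claim_equal_buscar_ultimo_py : Prop := ∀ (a : List Int) (x : Int) (start : Int) (end_ : Int), Dom_buscar_ultimo_py a x start end_ → Pre_buscar_ultimo_py a x start end_ → Spec_buscar_ultimo_py a x start end_ (buscar_ultimo_py a x start end_)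

-- ===== LEMMAS AND PROOFS =====

lemma alt_empty (a : List Int) (x start end_ : Int) (h : end_ < start) :
    buscar_ultimo_py_alt a x start end_ = -1 := by
  rw [buscar_ultimo_py_alt,
    PySem.List.pyRange_neg_one_eq_nil (by omega : end_ ≤ start - 1)]
  rfl

lemma alt_step (a : List Int) (x start end_ : Int) (h : start ≤ end_) :
    buscar_ultimo_py_alt a x start end_ =
      if PySem.List.pyGet? a end_ = some x then end_
      else buscar_ultimo_py_alt a x start (end_ - 1) := by
  rw [buscar_ultimo_py_alt,
    PySem.List.pyRange_neg_one_cons (by omega : start - 1 < end_), List.find?_cons]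
  by_cases hx : PySem.List.pyGet? a end_ = some x
  · simp [hx]
  · have hb : (PySem.List.pyGet? a end_ == some x) = false := by
      simp [hx]
    rw [hb, if_neg hx]
    rfl

-- B's result is -1 or an index inside [start, end_]
lemma alt_bounds (a : List Int) (x start end_ : Int) :
    buscar_ultimo_py_alt a x start end_ = -1 ∨
      (start ≤ buscar_ultimo_py_alt a x start end_ ∧
        buscar_ultimo_py_alt a x start end_ ≤ end_) := by
  rw [buscar_ultimo_py_alt]
  cases hf : (PySem.List.pyRange end_ (start - 1) (-1)).find?
      (fun i => PySem.List.pyGet? a i == some x) with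
  | none => exact Or.inl rfl
  | some i =>
    have hmem := List.mem_of_find?_eq_some hf
    rw [PySem.List.mem_pyRange_neg_one] at hmem
    have hi1 : start ≤ i := by omega
    exact Or.inr ⟨hi1, hmem.2⟩

-- splitting the backward scan at any midpoint gives the max-merge A computes
lemma alt_split (a : List Int) (x start mid end_ : Int) (hs : 0 ≤ start)
    (h1 : start ≤ mid) (h2 : mid ≤ end_) :
    buscar_ultimo_py_alt a x start end_ =
      max (buscar_ultimo_py_alt a x start mid)
          (buscar_ultimo_py_alt a x (mid + 1) end_) := by
  have hsplit : PySem.List.pyRange end_ (start - 1) (-1) =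
      PySem.List.pyRange end_ mid (-1) ++ PySem.List.pyRange mid (start - 1) (-1) := by
    rw [PySem.List.pyRange_neg_one_eq_reverse, PySem.List.pyRange_neg_one_eq_reverse,
      PySem.List.pyRange_neg_one_eq_reverse,
      show start - 1 + 1 = start from by omega,
      PySem.List.pyRange_one_append start (mid + 1) (end_ + 1) (by omega) (by omega)]
    simp
  have hmid : mid + 1 - 1 = mid := by omega
  rw [buscar_ultimo_py_alt, hsplit, List.find?_append]
  cases hf1 : (PySem.List.pyRange end_ mid (-1)).find?
      (fun i => PySem.List.pyGet? a i == some x) with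
  | some i =>
    have hmem := List.mem_of_find?_eq_some hf1
    rw [PySem.List.mem_pyRange_neg_one] at hmem
    have hB2 : buscar_ultimo_py_alt a x (mid + 1) end_ = i := by
      rw [buscar_ultimo_py_alt, hmid, hf1]
    rw [Option.some_or, hB2]
    show i = max (buscar_ultimo_py_alt a x start mid) i
    rcases alt_bounds a x start mid with h | h
    · rw [max_eq_right (by omega)]
    · rw [max_eq_right (by omega)]
  | none =>
    have hB2 : buscar_ultimo_py_alt a x (mid + 1) end_ = -1 := by
      rw [buscar_ultimo_py_alt, hmid, hf1]
    rw [Option.none_or, hB2]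
    have hB1 : (match (PySem.List.pyRange mid (start - 1) (-1)).find?
        (fun i => PySem.List.pyGet? a i == some x) with
        | some i => i
        | none => (-1 : Int)) = buscar_ultimo_py_alt a x start mid := by
      rw [buscar_ultimo_py_alt]
    rw [hB1]
    rcases alt_bounds a x start mid with h | h
    · rw [max_eq_left (by omega)]
    · rw [max_eq_left (by omega)]

lemma main_eq (a : List Int) (x : Int) : ∀ (n : ℕ) (start end_ : Int),
    (end_ - start).toNat = n → 0 ≤ start →
    buscar_ultimo_py a x start end_ = buscar_ultimo_py_alt a x start end_ := by
  intro n
  induction n using Nat.strong_induction_on with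
  | _ n ih =>
    intro start end_ hn hs
    rw [buscar_ultimo_py]
    by_cases he : start = end_
    · subst he
      rw [alt_step a x start start le_rfl, alt_empty a x start (start - 1) (by omega)]
      simp
    · by_cases hle : start ≤ end_
      · simp only [he, hle, if_false, if_true]
        have hmid : PySem.Int.floordiv (start + end_) 2 = (start + end_) / 2 := by
          simp [PySem.Int.floordiv, Int.fdiv_eq_ediv]
        set mid := PySem.Int.floordiv (start + end_) 2 with hmiddef
        have hb1 : start ≤ mid := by omega
        have hb2 : mid < end_ := by omega
        rw [ih (mid - start).toNat (by omega) start mid rfl hs,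
          ih (end_ - (mid + 1)).toNat (by omega) (mid + 1) end_ rfl (by omega)]
        exact (alt_split a x start mid end_ hs hb1 (by omega)).symm
      · simp only [he, hle, if_false]
        rw [alt_empty a x start end_ (by omega)]

-- ===== VERDICT (by name: the statement is the Claim_ definition above) =====
theorem buscar_ultimo_py_spec : Claim_equal_buscar_ultimo_py := by
  intro a x start end_ _hdom hpre
  unfold Spec_buscar_ultimo_py
  rcases hpre with h | h
  · rw [buscar_ultimo_py, alt_empty a x start end_ h]
    simp [show ¬ start = end_ by omega, show ¬ start ≤ end_ by omega]
  · exact main_eq a x (end_ - start).toNat start end_ rfl h.1
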